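-- pv_equiv track=rewrite | github.com/nellaiarun/microservice | models/transformations/standardize.py | uom_std_abb
-- ===== SOURCE A (Python) =====
-- def uom_std_abb(measure):
--   measure = measure.strip().lower()
--   uom_dict = {
--   "LBS": ["pound", "pounds", "lbs", "lb"],
--   "KGS": ["kilo", "kilos", "kilogram", "kilograms", "kilo gram", "kilo grams", "kg", "kgs"]
--   }
--   for key, value in uom_dict.items():
--     if measure in value: return(key)
--   return(None)
-- ===== SOURCE B (Python) =====
-- def uom_std_abb(measure):
--   m = measure.strip().lower()
--   if m.startswith("kilo"):
--     return "KGS" if m[4:] in ("", "s", "gram", "grams", " gram", " grams") else None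
--   if m.startswith("pound"):
--     return "LBS" if m[5:] in ("", "s") else None
--   if m in ("kg", "kgs"):
--     return "KGS"
--   if m in ("lb", "lbs"):
--     return "LBS"
--   return None
-- ===== Notes on version B (the rewrite author's own statement) =====
-- stated objective: alternative
-- what changed: Replaces the scan over the abbreviation->synonym-list table by prefix decomposition: B peels the stem ('kilo'/'pound') off the normalized string and classifies the remaining suffix, with the bare abbreviations kg/kgs/lb/lbs checked directly; no synonym table is consulted.
import Mathlib
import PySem

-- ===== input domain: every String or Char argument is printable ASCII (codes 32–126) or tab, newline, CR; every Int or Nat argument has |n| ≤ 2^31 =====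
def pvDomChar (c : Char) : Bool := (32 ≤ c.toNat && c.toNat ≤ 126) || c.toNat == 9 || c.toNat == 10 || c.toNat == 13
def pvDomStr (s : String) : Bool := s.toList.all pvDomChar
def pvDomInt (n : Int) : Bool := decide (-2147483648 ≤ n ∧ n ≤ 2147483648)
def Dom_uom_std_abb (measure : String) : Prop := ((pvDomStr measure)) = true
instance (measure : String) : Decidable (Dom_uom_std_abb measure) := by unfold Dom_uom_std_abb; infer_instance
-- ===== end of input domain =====

-- B replaces A's scan over the synonym table by prefix decomposition: it peels the stem
-- ("kilo"/"pound") off the normalized string and classifies the remaining suffix (objective: alternative).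

-- ===== PORT A =====
-- the for-loop over uom_dict.items(): first key whose synonym list contains the normalized measure
def uomLoopA (items : List (String × List String)) (m : String) : Option String :=
  match items with
  | [] => none
  | (key, value) :: rest => if value.contains m then some key else uomLoopA rest m

def uom_std_abb (measure : String) : Option String :=
  let m := PySem.Str.lower (PySem.Str.strip measure)
  uomLoopA [("LBS", ["pound", "pounds", "lbs", "lb"]),
            ("KGS", ["kilo", "kilos", "kilogram", "kilograms", "kilo gram", "kilo grams", "kg", "kgs"])] m

-- ===== PORT B =====
-- B's branch logic: stem-and-suffix classification of the normalized string
def uomClassifyB (m : String) : Option String :=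
  if PySem.Str.startswith m "kilo" then
    if ["", "s", "gram", "grams", " gram", " grams"].contains (PySem.Str.slice m (some 4) none)
    then some "KGS" else none
  else if PySem.Str.startswith m "pound" then
    if ["", "s"].contains (PySem.Str.slice m (some 5) none)
    then some "LBS" else none
  else if ["kg", "kgs"].contains m then some "KGS"
  else if ["lb", "lbs"].contains m then some "LBS"
  else none

def uom_std_abb_alt (measure : String) : Option String :=
  uomClassifyB (PySem.Str.lower (PySem.Str.strip measure))

-- ===== PRECONDITION & SPEC =====
def Spec_uom_std_abb (measure : String) (out : Option String) : Prop := out = uom_std_abb_alt measure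
instance (measure : String) (out : Option String) : Decidable (Spec_uom_std_abb measure out) := by unfold Spec_uom_std_abb; infer_instance

-- ===== CLAIM (what is proved, stated in full; the proofs are below) =====
def Claim_equal_uom_std_abb : Prop := ∀ (measure : String), Dom_uom_std_abb measure → Spec_uom_std_abb measure (uom_std_abb measure)

-- ===== LEMMAS AND PROOFS =====
-- A's table scan and B's stem-and-suffix classification agree on every string
lemma uom_classify_agree (m : String) :
    uomLoopA [("LBS", ["pound", "pounds", "lbs", "lb"]),
              ("KGS", ["kilo", "kilos", "kilogram", "kilograms", "kilo gram", "kilo grams", "kg", "kgs"])] m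
      = uomClassifyB m := by
  by_cases hk : PySem.Str.startswith m "kilo" = true
  · -- m = "kilo" ++ r: both sides decide by the suffix r
    have hk' := hk
    simp only [PySem.Str.startswith_eq] at hk'
    rw [PySem.Chars.startswith_iff] at hk'
    obtain ⟨r, hr⟩ := hk'
    have hs : (PySem.Str.slice m (some 4) none).toList = r := by
      simp only [PySem.Str.toList_slice, PySem.Chars.slice_eq_listSlice, ← hr]
      rw [PySem.List.slice_from _ (by norm_num : (0:Int) ≤ 4)]
      rfl
    simp only [uomLoopA, uomClassifyB, if_pos hk]
    simp [String.ext_iff, ← hr, hs, List.contains_eq_mem]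
  · by_cases hp : PySem.Str.startswith m "pound" = true
    · -- m = "pound" ++ r
      have hp' := hp
      simp only [PySem.Str.startswith_eq] at hp'
      rw [PySem.Chars.startswith_iff] at hp'
      obtain ⟨r, hr⟩ := hp'
      have hs : (PySem.Str.slice m (some 5) none).toList = r := by
        simp only [PySem.Str.toList_slice, PySem.Chars.slice_eq_listSlice, ← hr]
        rw [PySem.List.slice_from _ (by norm_num : (0:Int) ≤ 5)]
        rfl
      simp only [uomLoopA, uomClassifyB, if_neg hk, if_pos hp]
      simp [String.ext_iff, ← hr, hs, List.contains_eq_mem]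
    · -- no stem: only the bare abbreviations "kg"/"kgs"/"lb"/"lbs" can match
      have n1 : m ≠ "kilo" := fun h => hk (by rw [h]; decide)
      have n2 : m ≠ "kilos" := fun h => hk (by rw [h]; decide)
      have n3 : m ≠ "kilogram" := fun h => hk (by rw [h]; decide)
      have n4 : m ≠ "kilograms" := fun h => hk (by rw [h]; decide)
      have n5 : m ≠ "kilo gram" := fun h => hk (by rw [h]; decide)
      have n6 : m ≠ "kilo grams" := fun h => hk (by rw [h]; decide)
      have n7 : m ≠ "pound" := fun h => hp (by rw [h]; decide)
      have n8 : m ≠ "pounds" := fun h => hp (by rw [h]; decide)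
      by_cases e1 : m = "kg"
      · rw [e1]; decide
      by_cases e2 : m = "kgs"
      · rw [e2]; decide
      by_cases e3 : m = "lb"
      · rw [e3]; decide
      by_cases e4 : m = "lbs"
      · rw [e4]; decide
      simp only [uomClassifyB, if_neg hk, if_neg hp]
      simp [uomLoopA, List.contains_eq_mem, n1, n2, n3, n4, n5, n6, n7, n8, e1, e2, e3, e4]

-- ===== VERDICT (by name: the statement is the Claim_ definition above) =====
theorem uom_std_abb_spec : Claim_equal_uom_std_abb := by
  intro measure _
  unfold Spec_uom_std_abb uom_std_abb uom_std_abb_alt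
  exact uom_classify_agree _
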